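-- pv_equiv track=rewrite | github.com/jakoebl/Cube-Solver | generate_g2.py | co_coordinate_from_string
-- ===== SOURCE A (Python) =====
-- def co_coordinate_from_string(string):
--     exponent = 6
--     result = 0
--     for bit in string:
--         if bit == "1":
--             result += 3 ** exponent
--         elif bit == "2":
--             result += 2 * 3 ** exponent
--         exponent -= 1
--         if exponent == -1:
--             break
--     return result
-- ===== SOURCE B (Python) =====
-- def co_coordinate_from_string(string):
--     s = (string[:7] + "0000000")[:7]
--     result = 0
--     for c in s:
--         result = result * 3 + (1 if c == "1" else 2 if c == "2" else 0)
--     return result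
-- ===== Notes on version B (the rewrite author's own statement) =====
-- stated objective: simpler
-- what changed: Replaces the explicit-power sum with a decreasing exponent and mid-loop break by normalizing the input to a fixed 7-character field and folding Horner's rule (result = result*3 + digit) over it.
import Mathlib
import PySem

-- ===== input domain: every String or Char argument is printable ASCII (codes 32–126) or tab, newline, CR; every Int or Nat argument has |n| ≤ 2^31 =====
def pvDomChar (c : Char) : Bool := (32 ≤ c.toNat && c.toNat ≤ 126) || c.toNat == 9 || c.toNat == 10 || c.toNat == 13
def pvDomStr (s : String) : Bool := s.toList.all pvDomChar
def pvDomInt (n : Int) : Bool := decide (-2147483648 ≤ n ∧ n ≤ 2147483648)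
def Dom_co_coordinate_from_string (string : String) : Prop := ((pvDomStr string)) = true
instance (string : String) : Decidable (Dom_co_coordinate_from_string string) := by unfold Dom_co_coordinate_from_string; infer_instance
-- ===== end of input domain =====

-- B differs from A by decomposition: a fixed 7-character field and Horner's rule instead of
-- an explicit decreasing exponent with powers and a mid-loop break; objective: simpler.

-- ===== PORT A =====
-- A's loop: decreasing exponent from 6, add digit * 3^exponent, break when exponent hits -1.
def coLoopA : List Char → Int → Int → Int
  | [], _, result => result
  | bit :: rest, exponent, result =>
    let result :=
      if bit = '1' then result + 3 ^ exponent.toNat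
      else if bit = '2' then result + 2 * 3 ^ exponent.toNat
      else result
    let exponent := exponent - 1
    if exponent = -1 then result else coLoopA rest exponent result

def co_coordinate_from_string (string : String) : Int :=
  coLoopA string.toList 6 0

-- ===== PORT B =====
def co_coordinate_from_string_alt (string : String) : Int :=
  let s := PySem.List.slice (PySem.List.slice string.toList none (some 7)
             ++ "0000000".toList) none (some 7)
  s.foldl (fun result c =>
    result * 3 + (if c = '1' then 1 else if c = '2' then 2 else 0)) 0

-- ===== PRECONDITION & SPEC =====
def Spec_co_coordinate_from_string (string : String) (out : Int) : Prop := out = co_coordinate_from_string_alt string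
instance (string : String) (out : Int) : Decidable (Spec_co_coordinate_from_string string out) := by unfold Spec_co_coordinate_from_string; infer_instance

-- ===== CLAIM (what is proved, stated in full; the proofs are below) =====
def Claim_equal_co_coordinate_from_string : Prop := ∀ (string : String), Dom_co_coordinate_from_string string → Spec_co_coordinate_from_string string (co_coordinate_from_string string)

-- ===== LEMMAS AND PROOFS =====

def digitVal (c : Char) : Int := if c = '1' then 1 else if c = '2' then 2 else 0

def hornerStep (result : Int) (c : Char) : Int := result * 3 + digitVal c

-- the 7-character field, in take/replicate form
def pad (l : List Char) (k : Nat) : List Char := l.take k ++ List.replicate (k - l.length) '0'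

lemma foldl_horner_replicate (k : Nat) (a : Int) :
    (List.replicate k '0').foldl hornerStep a = a * 3 ^ k := by
  induction k generalizing a with
  | zero => simp
  | succ n ih =>
      simp [List.replicate_succ, List.foldl_cons, ih, hornerStep, digitVal]
      ring

lemma foldl_horner_shift (l : List Char) (a : Int) :
    l.foldl hornerStep a = a * 3 ^ l.length + l.foldl hornerStep 0 := by
  induction l generalizing a with
  | nil => simp
  | cons c t ih =>
      simp only [List.foldl_cons, List.length_cons]
      rw [ih (hornerStep a c), ih (hornerStep 0 c)]
      simp [hornerStep]
      ring

lemma length_pad (l : List Char) (k : Nat) : (pad l k).length = k := by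
  simp [pad]; omega

lemma pad_cons (c : Char) (t : List Char) (n : Nat) :
    pad (c :: t) (n + 1) = c :: pad t n := by
  simp [pad, List.take_succ_cons]

-- core invariant: A's loop from exponent n equals Horner over the (n+1)-field
lemma coLoopA_eq_horner (n : Nat) (l : List Char) (r : Int) :
    coLoopA l (n : Int) r = r + (pad l (n + 1)).foldl hornerStep 0 := by
  induction n generalizing l r with
  | zero =>
      cases l with
      | nil => simp [coLoopA, pad, hornerStep, digitVal]
      | cons c t =>
          simp [coLoopA, pad, hornerStep]
          by_cases h1 : c = '1' <;> by_cases h2 : c = '2' <;>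
            simp [h1, h2, digitVal]
  | succ n ih =>
      cases l with
      | nil =>
          simp [coLoopA, pad, foldl_horner_replicate]
      | cons c t =>
          have hne : ((n : Int) + 1) - 1 ≠ -1 := by omega
          have hcast : ((n : Int) + 1) - 1 = (n : Int) := by ring
          have hpow : ((n : Int) + 1).toNat = n + 1 := by omega
          rw [pad_cons, List.foldl_cons]
          rw [foldl_horner_shift (pad t (n + 1)) (hornerStep 0 c), length_pad]
          show coLoopA (c :: t) ((n : Int) + 1) r = _
          simp only [coLoopA, hcast, hpow, ih, hornerStep, digitVal]
          rw [if_neg (show (n:Int) ≠ -1 by omega)]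
          by_cases h1 : c = '1' <;> by_cases h2 : c = '2' <;>
            simp [h1, h2] <;> ring

lemma slice_pad (l : List Char) :
    PySem.List.slice (PySem.List.slice l none (some 7) ++ "0000000".toList)
      none (some 7) = pad l 7 := by
  have h7 : ((7 : Nat) : Int) = (7 : Int) := by norm_num
  rw [← h7, PySem.List.slice_to_natCast, PySem.List.slice_to_natCast]
  have : ("0000000".toList : List Char) = List.replicate 7 '0' := by decide
  rw [this, List.take_append, List.take_take, List.take_replicate]
  simp only [pad, List.length_take, Nat.min_self]
  congr 2
  omega

-- ===== VERDICT (by name: the statement is the Claim_ definition above) =====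
theorem co_coordinate_from_string_spec : Claim_equal_co_coordinate_from_string := by
  intro s _
  unfold Spec_co_coordinate_from_string co_coordinate_from_string co_coordinate_from_string_alt
  rw [slice_pad]
  have h := coLoopA_eq_horner 6 s.toList 0
  norm_num at h
  rw [h]
  rfl
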